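-- pv_equiv track=rewrite | github.com/vinay-yadav/Introduction_To_DSA | 4. Sorting/1. Elements Removal.py | solve
-- ===== SOURCE A (Python) =====
-- def solve(A):
--     A.sort(reverse=True)
--     total = sum(A)
--
--     cost = 0
--
--     for i in A:
--         cost += total
--         total -= i
--
--     return cost
-- ===== SOURCE B (Python) =====
-- def solve(A):
--     A.sort(reverse=True)
--     return sum((i + 1) * v for i, v in enumerate(A))
-- ===== Notes on version B (the rewrite author's own statement) =====
-- stated objective: simpler
-- what changed: Replaces the running-total accumulator loop (cost += total; total -= i) with a direct weighted sum: after the same descending sort, return sum((i+1)*v for i,v in enumerate(A)).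
import Mathlib
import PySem

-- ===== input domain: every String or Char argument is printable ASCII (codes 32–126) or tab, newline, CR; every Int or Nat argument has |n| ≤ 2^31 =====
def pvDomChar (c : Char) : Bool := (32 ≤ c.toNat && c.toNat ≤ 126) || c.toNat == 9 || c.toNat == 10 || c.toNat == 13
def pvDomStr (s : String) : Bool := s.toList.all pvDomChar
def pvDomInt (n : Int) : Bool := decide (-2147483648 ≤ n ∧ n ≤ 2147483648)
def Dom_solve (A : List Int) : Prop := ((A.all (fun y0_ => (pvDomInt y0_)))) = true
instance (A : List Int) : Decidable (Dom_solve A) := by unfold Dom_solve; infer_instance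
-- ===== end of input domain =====

-- B replaces A's running-total accumulator loop by a direct (index+1)-weighted sum after the same
-- descending sort (objective: simpler). Both sort the argument in place in Python; the equivalence
-- proved here is about the return value.


-- ===== PORT A =====
def solve (A : List Int) : Int :=
  let S := PySem.List.sorted A (fun x => x) true   -- A.sort(reverse=True)
  let total := S.foldl (· + ·) 0                   -- total = sum(A)
  -- for i in A: cost += total; total -= i
  (S.foldl (fun (st : Int × Int) i => (st.1 + st.2, st.2 - i)) (0, total)).1

-- ===== PORT B =====
def solve_alt (A : List Int) : Int :=
  let S := PySem.List.sorted A (fun x => x) true   -- A.sort(reverse=True)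
  -- sum((i + 1) * v for i, v in enumerate(A))
  (PySem.List.enumerate S 0).foldl (fun acc p => acc + (p.1 + 1) * p.2) 0

-- ===== PRECONDITION & SPEC =====
def Spec_solve (A : List Int) (out : Int) : Prop := out = solve_alt A
instance (A : List Int) (out : Int) : Decidable (Spec_solve A out) := by unfold Spec_solve; infer_instance

-- ===== CLAIM (what is proved, stated in full; the proofs are below) =====
def Claim_equal_solve : Prop := ∀ (A : List Int), Dom_solve A → Spec_solve A (solve A)

-- ===== LEMMAS AND PROOFS =====

-- Σ over l of (length of the strict suffix after each position) * element, i.e. Σ (n-1-i) * l[i]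
def pvW : List Int → Int
  | [] => 0
  | a :: r => (r.length : Int) * a + pvW r

-- Σ i * l[i] (0-indexed)
def pvU : List Int → Int
  | [] => 0
  | _ :: r => r.sum + pvU r

lemma foldA_eq (l : List Int) : ∀ c t : Int,
    (l.foldl (fun (st : Int × Int) i => (st.1 + st.2, st.2 - i)) (c, t)).1
      = c + (l.length : Int) * t - pvW l := by
  induction l with
  | nil => intro c t; simp [pvW]
  | cons a r ih =>
      intro c t
      simp only [List.foldl_cons, ih, pvW, List.length_cons]
      push_cast
      ring

lemma foldB_eq (l : List Int) : ∀ s acc : Int,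
    (PySem.List.enumerate l s).foldl (fun acc p => acc + (p.1 + 1) * p.2) acc
      = acc + (s + 1) * l.sum + pvU l := by
  induction l with
  | nil => intro s acc; simp [PySem.List.enumerate_nil, pvU]
  | cons a r ih =>
      intro s acc
      simp only [PySem.List.enumerate_cons, List.foldl_cons, ih, pvU, List.sum_cons]
      ring

lemma weights_eq (l : List Int) : (l.length : Int) * l.sum - pvW l = l.sum + pvU l := by
  induction l with
  | nil => simp [pvW, pvU]
  | cons a r ih =>
      simp only [pvW, pvU, List.length_cons, List.sum_cons]
      push_cast
      nlinarith [ih]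

lemma foldl_add_eq_sum (l : List Int) : ∀ c : Int, l.foldl (· + ·) c = c + l.sum := by
  induction l with
  | nil => intro c; simp
  | cons a r ih => intro c; simp [List.foldl_cons, ih]; ring

-- ===== VERDICT (by name: the statement is the Claim_ definition above) =====
theorem solve_spec : Claim_equal_solve := by
  intro A _
  unfold Spec_solve solve solve_alt
  simp only []
  rw [foldA_eq, foldB_eq, foldl_add_eq_sum]
  have h := weights_eq (PySem.List.sorted A (fun x => x) true)
  push_cast at h ⊢
  linarith
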